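-- pv_equiv track=rewrite | github.com/sergiorgiraldo/Python-lang | data-engineering-interview-patterns/spark/03_window_functions/sessionization.py | sessionize_python
-- ===== SOURCE A (Python) =====
-- def sessionize_python(
--     events: list[tuple[str, int]],
--     timeout: int,
-- ) -> list[tuple[str, int, int]]:
--     """Assign session IDs based on inactivity gaps.
--
--     A new session starts when the gap between consecutive events
--     for the same user exceeds the timeout threshold.
--
--     Time:  O(n log n) for sort + O(n) for scan
--     Space: O(n) for the result
--
--     Args:
--         events: List of (user_id, timestamp) tuples.
--         timeout: Maximum gap (in seconds) before a new session starts.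
--
--     Returns:
--         List of (user_id, timestamp, session_id) tuples.
--
--     Example:
--         >>> sessionize_python([("u1", 100), ("u1", 110), ("u1", 500)], 60)
--         [('u1', 100, 0), ('u1', 110, 0), ('u1', 500, 1)]
--     """
--     # Sort by user then timestamp
--     sorted_events = sorted(events, key=lambda x: (x[0], x[1]))
--
--     result: list[tuple[str, int, int]] = []
--     prev_user: str | None = None
--     prev_ts: int = 0
--     session_id: int = 0
--
--     for user_id, ts in sorted_events:
--         if user_id != prev_user:
--             # New user, reset session counter
--             session_id = 0
--         elif ts - prev_ts > timeout:
--             # Same user, gap exceeds timeout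
--             session_id += 1
--
--         result.append((user_id, ts, session_id))
--         prev_user = user_id
--         prev_ts = ts
--
--     return result
-- ===== SOURCE B (Python) =====
-- def _session_rows(user_id, tss, timeout):
--     rows = []
--     session_id = 0
--     prev_ts = None
--     for ts in tss:
--         if prev_ts is not None and ts - prev_ts > timeout:
--             session_id += 1
--         rows.append((user_id, ts, session_id))
--         prev_ts = ts
--     return rows
--
--
-- def sessionize_python(events, timeout):
--     groups = {}
--     for user_id, ts in events:
--         groups[user_id] = groups.get(user_id, []) + [ts]
--     result = []
--     for user_id in sorted(groups):
--         result += _session_rows(user_id, sorted(groups[user_id]), timeout)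
--     return result
-- ===== Notes on version B (the rewrite author's own statement) =====
-- stated objective: alternative
-- what changed: B replaces A's single lexicographic sort of all events followed by one flat scan with user-change resets by building a dict grouping timestamps per user, then iterating users in sorted order and running an independent per-user scan over that user's sorted timestamps, concatenating the per-user rows.
import Mathlib
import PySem

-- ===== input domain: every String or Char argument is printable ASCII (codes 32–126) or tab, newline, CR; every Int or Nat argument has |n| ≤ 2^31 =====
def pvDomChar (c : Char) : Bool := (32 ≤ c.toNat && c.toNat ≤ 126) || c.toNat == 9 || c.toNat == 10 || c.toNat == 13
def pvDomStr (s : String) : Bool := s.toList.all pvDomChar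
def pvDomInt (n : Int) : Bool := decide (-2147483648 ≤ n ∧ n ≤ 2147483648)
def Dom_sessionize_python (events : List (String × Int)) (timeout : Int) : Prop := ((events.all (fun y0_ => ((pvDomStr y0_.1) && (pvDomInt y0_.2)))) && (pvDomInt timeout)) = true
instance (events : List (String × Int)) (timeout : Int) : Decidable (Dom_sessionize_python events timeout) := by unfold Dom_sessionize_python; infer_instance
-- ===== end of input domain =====

-- B replaces A's single lexicographic sort + one flat scan (with user-change resets) by a dict
-- grouping per user followed by per-user sorted scans concatenated in sorted-user order (alternative decomposition).

-- ===== PORT A =====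
-- loop body of A's single pass over the lexicographically sorted events;
-- state = (result, prev_user, prev_ts, session_id)
def sessStepA (timeout : Int) (st : List (String × Int × Int) × Option String × Int × Int)
    (e : String × Int) : List (String × Int × Int) × Option String × Int × Int :=
  let sid : Int :=
    if some e.1 ≠ st.2.1 then 0
    else if e.2 - st.2.2.1 > timeout then st.2.2.2 + 1
    else st.2.2.2
  (st.1 ++ [(e.1, e.2, sid)], some e.1, e.2, sid)

def sessionize_python (events : List (String × Int)) (timeout : Int) : List (String × Int × Int) :=
  let sorted_events := PySem.List.sorted2 events (fun x => x.1) (fun x => x.2)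
  (sorted_events.foldl (sessStepA timeout) ([], none, 0, 0)).1

-- ===== PORT B =====
-- loop body of B's per-user scan; state = (session_id, prev_ts, rows)
def sessStepB (user : String) (timeout : Int)
    (st : Int × Option Int × List (String × Int × Int)) (ts : Int) :
    Int × Option Int × List (String × Int × Int) :=
  let sid : Int :=
    match st.2.1 with
    | some p => if ts - p > timeout then st.1 + 1 else st.1
    | none => st.1
  (sid, some ts, st.2.2 ++ [(user, ts, sid)])

-- _session_rows(user_id, tss, timeout) of Source B
def sessionRows (user : String) (tss : List Int) (timeout : Int) : List (String × Int × Int) :=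
  (tss.foldl (sessStepB user timeout) (0, none, [])).2.2

def sessionize_python_alt (events : List (String × Int)) (timeout : Int) : List (String × Int × Int) :=
  let groups : PySem.Dict String (List Int) :=
    events.foldl (fun d e => d.modify e.1 [] (fun l => l ++ [e.2])) PySem.Dict.empty
  (PySem.List.sorted groups.keys (fun u => u)).foldl
    (fun acc u => acc ++ sessionRows u (PySem.List.sorted (groups.getD u []) (fun t => t)) timeout) []

-- ===== PRECONDITION & SPEC =====
def Spec_sessionize_python (events : List (String × Int)) (timeout : Int) (out : List (String × Int × Int)) : Prop := out = sessionize_python_alt events timeout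
instance (events : List (String × Int)) (timeout : Int) (out : List (String × Int × Int)) : Decidable (Spec_sessionize_python events timeout out) := by unfold Spec_sessionize_python; infer_instance

-- ===== CLAIM (what is proved, stated in full; the proofs are below) =====
def Claim_equal_sessionize_python : Prop := ∀ (events : List (String × Int)) (timeout : Int), Dom_sessionize_python events timeout → Spec_sessionize_python events timeout (sessionize_python events timeout)

-- ===== LEMMAS AND PROOFS =====

-- A's tuple-key sort is the stable sort under the lexicographic key
lemma sorted2_eq_sorted_lex (xs : List (String × Int)) :
    PySem.List.sorted2 xs (fun x => x.1) (fun x => x.2) =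
    PySem.List.sorted xs (fun p => toLex p) := by
  simp only [PySem.List.sorted2, PySem.List.sorted, if_neg (by decide : ¬ (false = true))]
  congr 1
  funext acc x
  congr 1
  funext a b
  rw [Bool.eq_iff_iff]
  simp only [Bool.or_eq_true, Bool.and_eq_true, Bool.not_eq_true', decide_eq_true_eq,
    decide_eq_false_iff_not, Prod.Lex.toLex_lt_toLex]
  constructor
  · rintro (h | ⟨h2, h3⟩)
    · exact Or.inl h
    · rcases lt_trichotomy a.1 b.1 with h | h | h
      · exact Or.inl h
      · exact Or.inr ⟨h, h3⟩
      · exact absurd h h2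
  · rintro (h | ⟨he, h3⟩)
    · exact Or.inl h
    · exact Or.inr ⟨by rw [he]; exact lt_irrefl _, h3⟩

-- partition of a list over a nodup cover of its first components
lemma perm_flatMap_filter : ∀ (us : List String) (xs : List (String × Int)), us.Nodup →
    (∀ p ∈ xs, p.1 ∈ us) →
    (us.flatMap (fun u => xs.filter (fun p => p.1 == u))).Perm xs := by
  intro us
  induction us with
  | nil =>
    intro xs _ hcov
    cases xs with
    | nil => simp
    | cons p xs => exact absurd (hcov p (by simp)) (by simp)
  | cons u rest ih =>
    intro xs hnd hcov
    simp only [List.flatMap_cons]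
    have hrw : rest.flatMap (fun u' => xs.filter (fun p => p.1 == u'))
        = rest.flatMap (fun u' => (xs.filter (fun p => !(p.1 == u))).filter (fun p => p.1 == u')) := by
      apply List.flatMap_congr
      intro u' hu'
      have hne : u' ≠ u := fun h => (List.nodup_cons.mp hnd).1 (h ▸ hu')
      rw [List.filter_filter]
      apply List.filter_congr
      intro p _
      by_cases h : p.1 = u'
      · simp [h, hne]
      · simp [h]
    rw [hrw]
    have hperm := ih (xs.filter (fun p => !(p.1 == u))) (List.nodup_cons.mp hnd).2
      (by
        intro p hp
        have hmem := List.mem_of_mem_filter hp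
        have hne : ¬ (p.1 == u) = true := by
          have := (List.mem_filter.mp hp).2; simpa using this
        have := hcov p hmem
        simp only [List.mem_cons] at this
        rcases this with h | h
        · exact absurd (by simp [h]) hne
        · exact h)
    exact ((hperm.append_left _).trans (List.filter_append_perm _ xs))

-- the lexicographically sorted list is: sorted distinct users, each followed by its sorted timestamps
lemma sorted_lex_eq_flatMap (xs : List (String × Int)) :
    PySem.List.sorted xs (fun p => toLex p) =
    (PySem.List.sorted (PySem.List.dedup (xs.map (fun p => p.1))) (fun u => u)).flatMap
      (fun u => (PySem.List.sorted ((xs.filter (fun p => p.1 == u)).map (fun p => p.2)) (fun t => t)).map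
        (fun t => (u, t))) := by
  set U := PySem.List.sorted (PySem.List.dedup (xs.map (fun p => p.1))) (fun u => u) with hU
  have hUperm : U.Perm (PySem.List.dedup (xs.map (fun p => p.1))) := PySem.List.sorted_perm _ _ _
  have hUnodup : U.Nodup := hUperm.nodup_iff.mpr (PySem.List.nodup_dedup _)
  have hUlt : U.Pairwise (fun a b => a < b) := by
    have h1 : U.Pairwise (fun a b => a ≤ b) := PySem.List.sorted_pairwise _ _
    exact (h1.and hUnodup).imp (fun h => lt_of_le_of_ne h.1 h.2)
  apply PySem.List.eq_of_perm_of_pairwise_le_of_injective (key := fun p => toLex p) toLex.injective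
  · -- both sides are permutations of xs
    refine (PySem.List.sorted_perm _ _ _).trans ?_
    refine List.Perm.symm ?_
    have hinner : ∀ u ∈ U,
        ((PySem.List.sorted ((xs.filter (fun p => p.1 == u)).map (fun p => p.2)) (fun t => t)).map
          (fun t => (u, t))).Perm (xs.filter (fun p => p.1 == u)) := by
      intro u _
      refine ((PySem.List.sorted_perm _ _ _).map _).trans ?_
      rw [List.map_map]
      have heq : (xs.filter (fun p => p.1 == u)).map (fun p => (u, p.2)) = xs.filter (fun p => p.1 == u) := by
        conv_rhs => rw [← List.map_id (xs.filter (fun p => p.1 == u))]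
        apply List.map_congr_left
        intro p hp
        have h1 : p.1 = u := by
          have := (List.mem_filter.mp hp).2
          exact eq_of_beq (by simpa using this)
        show ((fun p : String × Int => (u, p.2)) p) = p
        simp only [← h1]
      rw [show ((fun t => (u, t)) ∘ fun p : String × Int => p.2) = (fun p : String × Int => (u, p.2)) from rfl, heq]
    refine (List.Perm.flatMap (List.Perm.refl U) hinner).trans ?_
    refine (hUperm.flatMap (fun a _ => List.Perm.refl _)).trans ?_
    apply perm_flatMap_filter
    · exact PySem.List.nodup_dedup _
    · intro p hp
      exact (PySem.List.mem_dedup _ _).mpr (List.mem_map_of_mem hp)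
  · exact PySem.List.sorted_pairwise _ _
  · rw [List.pairwise_flatMap]
    constructor
    · intro u _
      rw [List.pairwise_map]
      refine (PySem.List.sorted_pairwise _ _).imp ?_
      intro a b hab
      rw [Prod.Lex.le_iff]
      exact Or.inr ⟨rfl, hab⟩
    · refine hUlt.imp ?_
      intro u v huv x hx y hy
      obtain ⟨s, _, rfl⟩ := List.mem_map.mp hx
      obtain ⟨t, _, rfl⟩ := List.mem_map.mp hy
      exact le_of_lt (Prod.Lex.toLex_lt_toLex.mpr (Or.inl huv))

-- A's fold appends to its accumulator
lemma foldA_acc (timeout : Int) : ∀ (l : List (String × Int)) (acc : List (String × Int × Int))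
    (pu : Option String) (p sid : Int),
    l.foldl (sessStepA timeout) (acc, pu, p, sid)
    = (acc ++ (l.foldl (sessStepA timeout) ([], pu, p, sid)).1,
       (l.foldl (sessStepA timeout) ([], pu, p, sid)).2) := by
  intro l
  induction l with
  | nil => intro acc pu p sid; simp
  | cons e l ih =>
    intro acc pu p sid
    simp only [List.foldl_cons, sessStepA]
    rw [ih, ih (([] : List (String × Int × Int)) ++ _)]
    simp

-- B's fold appends to its accumulator
lemma foldB_acc (u : String) (timeout : Int) : ∀ (l : List Int) (sid : Int) (pv : Option Int)
    (acc : List (String × Int × Int)),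
    l.foldl (sessStepB u timeout) (sid, pv, acc)
    = ((l.foldl (sessStepB u timeout) (sid, pv, [])).1,
       (l.foldl (sessStepB u timeout) (sid, pv, [])).2.1,
       acc ++ (l.foldl (sessStepB u timeout) (sid, pv, [])).2.2) := by
  intro l
  induction l with
  | nil => intro sid pv acc; simp
  | cons t l ih =>
    intro sid pv acc
    simp only [List.foldl_cons, sessStepB]
    rw [ih, ih _ _ (([] : List (String × Int × Int)) ++ _)]
    simp

-- B's prev_ts stays set once set
lemma foldB_prev_isSome (u : String) (timeout : Int) : ∀ (l : List Int) (sid p : Int)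
    (acc : List (String × Int × Int)),
    ((l.foldl (sessStepB u timeout) (sid, some p, acc)).2.1).isSome := by
  intro l
  induction l with
  | nil => intro sid p acc; simp
  | cons t l ih =>
    intro sid p acc
    simp only [List.foldl_cons, sessStepB]
    exact ih _ _ _

-- a same-user run of A's fold is B's per-user fold
lemma run_eq (u : String) (timeout : Int) : ∀ (ts : List Int) (sid p : Int),
    (ts.map (fun t => (u, t))).foldl (sessStepA timeout) ([], some u, p, sid)
    = ((ts.foldl (sessStepB u timeout) (sid, some p, [])).2.2, some u,
       ((ts.foldl (sessStepB u timeout) (sid, some p, [])).2.1).getD p,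
       (ts.foldl (sessStepB u timeout) (sid, some p, [])).1) := by
  intro ts
  induction ts with
  | nil => intro sid p; simp
  | cons t ts ih =>
    intro sid p
    simp only [List.map_cons, List.foldl_cons, sessStepA, sessStepB]
    simp only [ne_eq, not_true_eq_false, if_false]
    rw [foldA_acc, ih]
    rw [foldB_acc u timeout ts _ _ ([] ++ [(u, t, _)])]
    have hs := foldB_prev_isSome u timeout ts (if t - p > timeout then sid + 1 else sid) t []
    obtain ⟨q, hq⟩ := Option.isSome_iff_exists.mp hs
    simp [hq]

-- A's fold over user-blocks is the concatenation of B's per-user scans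
lemma outer_eq (timeout : Int) : ∀ (gs : List (String × List Int)) (pu : Option String) (p sid : Int),
    (∀ g ∈ gs, g.2 ≠ []) → (∀ g ∈ gs, pu ≠ some g.1) → gs.Pairwise (fun g g' => g.1 ≠ g'.1) →
    ((gs.flatMap (fun g => g.2.map (fun t => (g.1, t)))).foldl (sessStepA timeout) ([], pu, p, sid)).1
    = gs.flatMap (fun g => sessionRows g.1 g.2 timeout) := by
  intro gs
  induction gs with
  | nil => intro pu p sid _ _ _; simp
  | cons g rest ih =>
    rintro pu p sid hne hpu hpw
    obtain ⟨u, tss⟩ := g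
    cases tss with
    | nil => exact absurd rfl (hne (u, []) (by simp))
    | cons t ts =>
      simp only [List.flatMap_cons, List.map_cons, List.cons_append, List.foldl_cons,
        List.foldl_append]
      have hstep : sessStepA timeout ([], pu, p, sid) (u, t) = ([(u, t, 0)], some u, t, 0) := by
        have : some (u, t).1 ≠ pu := fun h => hpu (u, t :: ts) (by simp) h.symm
        simp [sessStepA, this]
      rw [hstep]
      rw [foldA_acc timeout (ts.map (fun t => (u, t))) [(u, t, 0)] (some u) t 0, run_eq]
      rw [foldA_acc]
      have hrest := ih (some u) (((ts.foldl (sessStepB u timeout) (0, some t, [])).2.1).getD t)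
        ((ts.foldl (sessStepB u timeout) (0, some t, [])).1)
        (fun g hg => hne g (by simp [hg]))
        (fun g hg => by
          have := (List.pairwise_cons.mp hpw).1 g hg
          simpa using fun h => this h)
        (List.pairwise_cons.mp hpw).2
      rw [hrest]
      have hrows : sessionRows u (t :: ts) timeout
          = (u, t, 0) :: (ts.foldl (sessStepB u timeout) (0, some t, [])).2.2 := by
        simp only [sessionRows, List.foldl_cons, sessStepB]
        rw [foldB_acc u timeout ts 0 (some t) ([] ++ [(u, t, 0)])]
        simp
      simp [hrows]

-- assembly: A's pass equals B's grouped traversal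
lemma main_eq (events : List (String × Int)) (timeout : Int) :
    sessionize_python events timeout = sessionize_python_alt events timeout := by
  unfold sessionize_python sessionize_python_alt
  rw [PySem.List.foldl_append_eq_flatMap]
  rw [PySem.Dict.keys_foldl_modify_key
        (l := events) (key := fun e => e.1) (d0 := ([] : List Int))
        (f := fun d e => fun l => l ++ [e.2]) (d := PySem.Dict.empty)]
  rw [PySem.Dict.keys_empty]
  have hkeys : PySem.Set.update ([] : List String) (events.map (fun e => e.1))
      = PySem.List.dedup (events.map (fun p => p.1)) := by
    simp [PySem.List.dedup_eq_ofList, PySem.Set.ofList_eq_foldl, PySem.Set.update]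
  rw [hkeys]
  have hgetD : ∀ u, (events.foldl (fun d e => d.modify e.1 [] (fun l => l ++ [e.2]))
        PySem.Dict.empty).getD u []
      = (events.filter (fun p => p.1 == u)).map (fun p => p.2) := by
    intro u
    rw [PySem.Dict.getD_foldl_modify_append, PySem.Dict.getD_empty]
    simp
  simp only [hgetD]
  rw [sorted2_eq_sorted_lex, sorted_lex_eq_flatMap]
  set U := PySem.List.sorted (PySem.List.dedup (events.map (fun p => p.1))) (fun u => u) with hU
  rw [show (U.flatMap (fun u =>
        (PySem.List.sorted ((events.filter (fun p => p.1 == u)).map (fun p => p.2)) (fun t => t)).map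
          (fun t => (u, t))))
      = ((U.map (fun u => (u, PySem.List.sorted ((events.filter (fun p => p.1 == u)).map (fun p => p.2)) (fun t => t)))).flatMap
          (fun g => g.2.map (fun t => (g.1, t)))) from by rw [List.flatMap_map]]
  rw [outer_eq]
  · simp [List.flatMap_map]
  · -- every group of an occurring user is nonempty
    intro g hg
    obtain ⟨u, hu, rfl⟩ := List.mem_map.mp hg
    simp only [ne_eq, PySem.List.sorted_eq_nil_iff]
    intro hnil
    have humem : u ∈ events.map (fun p => p.1) :=
      (PySem.List.mem_dedup _ _).mp ((PySem.List.mem_sorted _ _ _ u).mp hu)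
    obtain ⟨p, hp, rfl⟩ := List.mem_map.mp humem
    have : p ∈ events.filter (fun q => q.1 == p.1) := List.mem_filter.mpr ⟨hp, by simp⟩
    have := List.mem_map_of_mem (f := fun q : String × Int => q.2) this
    rw [hnil] at this
    exact absurd this (List.not_mem_nil)
  · intro g _; simp
  · rw [List.pairwise_map]
    have hUnodup : U.Nodup :=
      (PySem.List.sorted_perm _ _ _).nodup_iff.mpr (PySem.List.nodup_dedup _)
    exact hUnodup.imp (fun h => by simpa using h)

-- ===== VERDICT (by name: the statement is the Claim_ definition above) =====
theorem sessionize_python_spec : Claim_equal_sessionize_python := by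
  intro events timeout _
  unfold Spec_sessionize_python
  exact main_eq events timeout
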